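-- pv_equiv track=rewrite | github.com/Hipsta666/Text-corrector | main.py | special_point_after
-- ===== SOURCE A (Python) =====
-- def special_point_after(text):
--     """The function places a space after the “.” sign."""
--     line = ""
--     text += " "
--     for letter in range(len(text)):
--         if text[letter - 1] == "." and text[letter] != " ":
--             line += " "
--         if text[letter - 1] == "?" and text[letter] != " ":
--             line += " "
--         if text[letter - 1] == "!" and text[letter] != " ":
--             line += " " + text[letter]
--         else:
--             line += text[letter]
--     return line
-- ===== SOURCE B (Python) =====
-- def _fix(t, mark):
--     """Split t at the first occurrence of mark, recursively fix the remainder,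
--     and rejoin with a space after mark unless the remainder starts with one."""
--     i = t.find(mark)
--     if i == -1:
--         return t
--     rest = _fix(t[i + 1:], mark)
--     return t[:i] + mark + ("" if rest.startswith(" ") else " ") + rest
--
--
-- def special_point_after(text):
--     """The function places a space after the "." sign."""
--     t = text + " "
--     for mark in ".?!":
--         t = _fix(t, mark)
--     return t
-- ===== Notes on version B (the rewrite author's own statement) =====
-- stated objective: faster
-- what changed: Replaces A's per-character Python-level scan with string concatenation by three staged passes, one per punctuation mark, each recursively splitting the text at the first occurrence of its mark with str.find/slices and rejoining with a space after the mark unless the remainder already starts with one.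
import Mathlib
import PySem

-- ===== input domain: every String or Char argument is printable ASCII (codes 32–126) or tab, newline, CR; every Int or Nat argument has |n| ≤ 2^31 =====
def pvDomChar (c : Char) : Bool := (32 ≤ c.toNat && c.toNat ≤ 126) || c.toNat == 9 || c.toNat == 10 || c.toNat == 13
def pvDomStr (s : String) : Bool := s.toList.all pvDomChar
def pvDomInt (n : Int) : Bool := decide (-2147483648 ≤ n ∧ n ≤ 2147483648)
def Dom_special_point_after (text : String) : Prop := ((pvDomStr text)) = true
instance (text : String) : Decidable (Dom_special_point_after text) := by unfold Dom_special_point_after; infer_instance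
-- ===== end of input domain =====

-- B replaces A's single adjacent-character scan by three staged passes, one per mark
-- ('.', '?', '!'): each pass recursively splits the text at the first occurrence of its
-- mark (str.find + slices) and rejoins with a space after the mark unless the remainder
-- starts with one (measured faster: bulk find/slice work instead of per-character Python steps).


-- ===== PORT A =====
-- literal port of A; string work is done on List Char (PySem style); text[letter-1] / text[letter]
-- is PySem.List.pyGetD, exact here because the index is always in range (the list is nonempty, so
-- -1 ≤ letter-1 < len and 0 ≤ letter < len never raise in Python)
def special_point_after (text : String) : String :=
  let t := text.toList ++ [' ']          -- text += " "
  String.ofList ((List.range t.length).foldl (fun line (letter : Nat) =>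
    let prev := PySem.List.pyGetD t ((letter : Int) - 1) ' '
    let cur  := PySem.List.pyGetD t ((letter : Int)) ' '
    let line := if prev == '.' && cur != ' ' then line ++ [' '] else line
    let line := if prev == '?' && cur != ' ' then line ++ [' '] else line
    if prev == '!' && cur != ' ' then line ++ [' ', cur] else line ++ [cur]) [])

-- ===== PORT B =====
-- literal port of Source B's _fix: i = t.find(mark); if i == -1: return t;
-- rest = _fix(t[i+1:], mark); return t[:i] + mark + ("" if rest.startswith(" ") else " ") + rest
def pvFix (mark : Char) (t : List Char) : List Char :=
  let i := PySem.Chars.find t [mark]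
  if h : i = -1 then t
  else
    let rest := pvFix mark (PySem.List.slice t (some (i + 1)) none)
    PySem.List.slice t none (some i) ++ [mark] ++
      (if PySem.Chars.startswith rest [' '] then [] else [' ']) ++ rest
termination_by t.length
decreasing_by
  have h0 : 0 ≤ i := by
    have := PySem.Chars.neg_one_le_find t [mark]
    omega
  have hpre := (PySem.Chars.find_spec h0).1
  have hlt : (PySem.Chars.find t [mark]).toNat < t.length := by
    by_contra hge
    rw [List.drop_eq_nil_of_le (by omega)] at hpre
    simp [List.prefix_nil] at hpre
  have heq : PySem.Chars.find t [mark] + 1 = (((PySem.Chars.find t [mark]).toNat + 1 : Nat) : Int) := by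
    omega
  rw [heq, PySem.List.slice_from_natCast, List.length_drop]
  omega

-- literal port of Source B's special_point_after: t = text + " "; for mark in ".?!": t = _fix(t, mark)
def special_point_after_alt (text : String) : String :=
  String.ofList (['.', '?', '!'].foldl (fun t mark => pvFix mark t) (text.toList ++ [' ']))

-- ===== PRECONDITION & SPEC =====
def Spec_special_point_after (text : String) (out : String) : Prop := out = special_point_after_alt text
instance (text : String) (out : String) : Decidable (Spec_special_point_after text out) := by unfold Spec_special_point_after; infer_instance

-- ===== CLAIM (what is proved, stated in full; the proofs are below) =====
def Claim_equal_special_point_after : Prop := ∀ (text : String), Dom_special_point_after text → Spec_special_point_after text (special_point_after text)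

-- ===== LEMMAS AND PROOFS =====

-- B's pair function (for characterising A's loop)
def pvF (pc : Char × Char) : List Char :=
  if (pc.1 == '.' || pc.1 == '?' || pc.1 == '!') && pc.2 != ' ' then [' ', pc.2] else [pc.2]

-- A's per-index contribution (the three ifs collapsed into one appended block)
def pvG (p c : Char) : List Char :=
  (if p == '.' && c != ' ' then [' '] else []) ++
  (if p == '?' && c != ' ' then [' '] else []) ++
  (if p == '!' && c != ' ' then [' ', c] else [c])

-- "insert a space after every occurrence of m that is not followed by a space"
def pvIns (m : Char) : List Char → List Char
  | [] => []
  | [x] => [x]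
  | x :: y :: r => x :: (if x == m && y != ' ' then ' ' :: pvIns m (y :: r) else pvIns m (y :: r))

-- the same for all three marks at once
def pvInsAll : List Char → List Char
  | [] => []
  | [x] => [x]
  | x :: y :: r => x :: (if (x == '.' || x == '?' || x == '!') && y != ' '
      then ' ' :: pvInsAll (y :: r) else pvInsAll (y :: r))

lemma pvIns_two (m x y : Char) (r : List Char) :
    pvIns m (x :: y :: r) =
      x :: (if x == m && y != ' ' then ' ' :: pvIns m (y :: r) else pvIns m (y :: r)) := rfl

lemma pvInsAll_two (x y : Char) (r : List Char) :
    pvInsAll (x :: y :: r) =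
      x :: (if (x == '.' || x == '?' || x == '!') && y != ' '
        then ' ' :: pvInsAll (y :: r) else pvInsAll (y :: r)) := rfl

-- A's loop body appends pvG of the (prev, cur) pair
lemma pvA_step (line : List Char) (p c : Char) :
    (let l1 := if p == '.' && c != ' ' then line ++ [' '] else line
     let l2 := if p == '?' && c != ' ' then l1 ++ [' '] else l1
     if p == '!' && c != ' ' then l2 ++ [' ', c] else l2 ++ [c]) = line ++ pvG p c := by
  unfold pvG
  by_cases h1 : p = '.' <;> by_cases h2 : p = '?' <;> by_cases h3 : p = '!' <;>
    by_cases hc : c = ' ' <;> simp_all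

lemma pvG_eq_pvF (p c : Char) : pvG p c = pvF (p, c) := by
  unfold pvG pvF
  by_cases h1 : p = '.' <;> by_cases h2 : p = '?' <;> by_cases h3 : p = '!' <;>
    by_cases hc : c = ' ' <;> simp_all

lemma pvG_space (c : Char) : pvG ' ' c = [c] := by unfold pvG; simp

-- inner indices: flatMap of pvG over getD index pairs equals flatMap of pvF over the zip pairs
lemma pv_pairs (l : List Char) :
    (List.range l.tail.length).flatMap (fun j => pvG (l.getD j ' ') (l.getD (j+1) ' ')) =
      (l.zip l.tail).flatMap pvF := by
  induction l with
  | nil => simp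
  | cons x l ih =>
    cases l with
    | nil => simp
    | cons y r =>
      simp only [List.tail_cons, List.length_cons] at ih ⊢
      rw [List.range_succ_eq_map]
      simp only [List.flatMap_cons, List.flatMap_map, List.getD_cons_zero, List.getD_cons_succ,
        List.zip_cons_cons]
      rw [pvG_eq_pvF]
      have h2 := ih
      simp only [List.getD_cons_succ] at h2
      rw [h2]

-- A's fold over a list of the shape s ++ [' '] computes head :: flatMap pvF over adjacent pairs
lemma pv_main (s : List Char) :
    (List.range (s ++ [' ']).length).foldl (fun line (letter : Nat) =>
      let prev := PySem.List.pyGetD (s ++ [' ']) ((letter : Int) - 1) ' '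
      let cur  := PySem.List.pyGetD (s ++ [' ']) ((letter : Int)) ' '
      let line := if prev == '.' && cur != ' ' then line ++ [' '] else line
      let line := if prev == '?' && cur != ' ' then line ++ [' '] else line
      if prev == '!' && cur != ' ' then line ++ [' ', cur] else line ++ [cur]) [] =
    PySem.List.pyGetD (s ++ [' ']) 0 ' ' ::
      ((s ++ [' ']).zip (s ++ [' ']).tail).flatMap pvF := by
  set t := s ++ [' '] with ht
  have hstep : (fun line (letter : Nat) =>
      let prev := PySem.List.pyGetD t ((letter : Int) - 1) ' '
      let cur  := PySem.List.pyGetD t ((letter : Int)) ' '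
      let line := if prev == '.' && cur != ' ' then line ++ [' '] else line
      let line := if prev == '?' && cur != ' ' then line ++ [' '] else line
      if prev == '!' && cur != ' ' then line ++ [' ', cur] else line ++ [cur]) =
      (fun line (letter : Nat) => line ++
        pvG (PySem.List.pyGetD t ((letter : Int) - 1) ' ') (PySem.List.pyGetD t ((letter : Int)) ' ')) := by
    funext line letter
    exact pvA_step line _ _
  rw [hstep, PySem.List.foldl_append_eq_flatMap]
  have hlen : t.length = t.tail.length + 1 := by
    rw [ht]; cases s <;> simp
  rw [hlen, List.range_succ_eq_map]
  simp only [List.flatMap_cons, List.flatMap_map, List.nil_append, Nat.cast_zero]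
  have hprev0 : PySem.List.pyGetD t ((0 : Int) - 1) ' ' = ' ' := by
    show PySem.List.pyGetD t (-1) ' ' = ' '
    rw [ht, PySem.List.pyGetD_neg_one_append_singleton]
  rw [hprev0, pvG_space]
  simp only [List.singleton_append]
  congr 1
  have hfun : ∀ j : Nat,
      pvG (PySem.List.pyGetD t ((j.succ : Int) - 1) ' ') (PySem.List.pyGetD t (j.succ : Int) ' ')
      = pvG (t.getD j ' ') (t.getD (j+1) ' ') := by
    intro j
    have h1 : ((j.succ : Nat) : Int) - 1 = ((j : Nat) : Int) := by push_cast; ring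
    rw [h1, PySem.List.pyGetD_natCast, PySem.List.pyGetD_natCast]
  calc (List.range t.tail.length).flatMap (fun j =>
          pvG (PySem.List.pyGetD t ((j.succ : Int) - 1) ' ') (PySem.List.pyGetD t (j.succ : Int) ' '))
      = (List.range t.tail.length).flatMap (fun j => pvG (t.getD j ' ') (t.getD (j+1) ' ')) := by
        apply List.flatMap_congr; intro j _; exact hfun j
    _ = (t.zip t.tail).flatMap pvF := pv_pairs t

-- head :: pair-flatMap IS pvInsAll
lemma pv_flat (x : Char) (l : List Char) :
    x :: ((x :: l).zip l).flatMap pvF = pvInsAll (x :: l) := by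
  induction l generalizing x with
  | nil => simp [pvInsAll]
  | cons y r ih =>
    have h := ih y
    simp only [List.zip_cons_cons, List.flatMap_cons] at h ⊢
    show x :: (pvF (x, y) ++ _) = pvInsAll (x :: y :: r)
    unfold pvF pvInsAll
    by_cases hc : ((x == '.' || x == '?' || x == '!') && y != ' ') = true
    · simp only [hc, if_pos]
      simp only [List.cons_append, List.nil_append]
      rw [← h]
      rfl
    · simp only [Bool.not_eq_true] at hc
      simp only [hc, Bool.false_eq_true, if_false, List.singleton_append]
      rw [← h]
      rfl

-- pvIns keeps the head
lemma pvIns_cons_head (m z : Char) (w : List Char) : ∃ tl, pvIns m (z :: w) = z :: tl := by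
  cases w with
  | nil => exact ⟨[], rfl⟩
  | cons y r => unfold pvIns; split <;> exact ⟨_, rfl⟩

-- pvIns keeps the last element
lemma pvIns_getLast? (m : Char) (t : List Char) : (pvIns m t).getLast? = t.getLast? := by
  induction t with
  | nil => rfl
  | cons x l ih =>
    cases l with
    | nil => rfl
    | cons y r =>
      obtain ⟨tl, htl⟩ := pvIns_cons_head m y r
      rw [pvIns_two]
      split <;>
      · rw [htl]
        simp only [List.getLast?_cons_cons]
        rw [← htl, ih]

-- pvIns walks through a prefix free of m unchanged
lemma pvIns_skip (m : Char) (a t : List Char) (ha : m ∉ a) :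
    pvIns m (a ++ t) = a ++ pvIns m t := by
  induction a with
  | nil => rfl
  | cons c a' ih =>
    have hc : c ≠ m := fun h => ha (h ▸ List.mem_cons_self)
    have ha' : m ∉ a' := fun h => ha (List.mem_cons_of_mem _ h)
    cases hnil : a' ++ t with
    | nil =>
      rcases List.append_eq_nil_iff.mp hnil with ⟨h1, h2⟩
      subst h1; subst h2; rfl
    | cons z w =>
      have hcm : (c == m) = false := by simp [hc]
      rw [List.cons_append, hnil, pvIns_two]
      simp only [hcm, Bool.false_and, Bool.false_eq_true, if_false]
      rw [← hnil, ih ha', List.cons_append]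

lemma pvIns_no_mem (m : Char) (a : List Char) (ha : m ∉ a) : pvIns m a = a := by
  have h := pvIns_skip m a [] ha
  rw [List.append_nil] at h
  rw [h]
  show a ++ pvIns m [] = a
  rw [show pvIns m [] = [] from rfl, List.append_nil]

-- pvFix computes pvIns whenever the last character is not the mark
lemma pvFix_eq_pvIns (m : Char) (t : List Char) (hlast : t.getLast? ≠ some m) :
    pvFix m t = pvIns m t := by
  induction hn : t.length using Nat.strong_induction_on generalizing t with
  | _ n ihn =>
  rw [pvFix]
  by_cases h : PySem.Chars.find t [m] = -1
  · rw [dif_pos h]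
    have hmem : ¬ [m] <:+: t := (PySem.Chars.find_eq_neg_one_iff t [m]).mp h
    have hnm : m ∉ t := by
      intro hm
      obtain ⟨u, v, huv⟩ := List.append_of_mem hm
      exact hmem ⟨u, v, by rw [huv]; simp⟩
    rw [pvIns_no_mem m t hnm]
  · rw [dif_neg h]
    have h0 : 0 ≤ PySem.Chars.find t [m] := by
      have := PySem.Chars.neg_one_le_find t [m]
      omega
    set i := PySem.Chars.find t [m] with hi
    set k := i.toNat with hk
    obtain ⟨hpre, hmin⟩ := PySem.Chars.find_spec h0
    have hklt : k < t.length := by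
      by_contra hge
      rw [List.drop_eq_nil_of_le (by omega)] at hpre
      simp [List.prefix_nil] at hpre
    have hik : i = ((k : Nat) : Int) := by omega
    have hik1 : i + 1 = ((k + 1 : Nat) : Int) := by omega
    rw [hik1, PySem.List.slice_from_natCast, hik, PySem.List.slice_to_natCast]
    -- decompose t = take k ++ m :: drop (k+1)
    have hdropk : t.drop k = m :: t.drop (k + 1) := by
      have h1 : (t.drop k).head? = some m := by
        rcases hpre with ⟨u, hu⟩
        rw [← hu]; rfl
      cases hdk : t.drop k with
      | nil => rw [hdk] at h1; simp at h1
      | cons z w =>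
        rw [hdk] at h1
        simp only [List.head?_cons, Option.some.injEq] at h1
        subst h1
        have hw : w = t.drop (k + 1) := by
          have htd : (List.drop k t).tail = List.drop (k + 1) t := List.tail_drop
          rw [hdk] at htd
          simpa using htd
        rw [hw]
    have hsplit : t = t.take k ++ m :: t.drop (k + 1) := by
      conv_lhs => rw [← List.take_append_drop k t]
      rw [hdropk]
    have hnma : m ∉ t.take k := by
      intro hm
      obtain ⟨j, hj, hget⟩ := List.getElem_of_mem hm
      have hjk : j < k := by
        simp only [List.length_take] at hj
        omega
      have hjt : j < t.length := by omega
      have hgt : t[j] = m := by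
        rw [← hget]
        simp [List.getElem_take]
      apply hmin j hjk
      have hdj : t.drop j = m :: t.drop (j + 1) := by
        rw [List.drop_eq_getElem_cons hjt, hgt]
      rw [hdj]
      exact ⟨_, rfl⟩
    -- the remainder is nonempty (t does not end with m)
    have hbne : t.drop (k + 1) ≠ [] := by
      intro hb
      apply hlast
      rw [hsplit, hb]
      simp
    obtain ⟨z, w, hzw⟩ := List.exists_cons_of_ne_nil hbne
    -- induction hypothesis on the remainder
    have hlenb : (t.drop (k + 1)).length < n := by
      rw [← hn]
      simp only [List.length_drop]
      omega
    have hlastb : (t.drop (k + 1)).getLast? ≠ some m := by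
      rw [hzw]
      rw [hsplit, hzw] at hlast
      have h1 : (List.take k t ++ m :: z :: w).getLast? = (z :: w).getLast? := by
        rw [List.getLast?_append_of_ne_nil _ (by simp), List.getLast?_cons_cons]
      rw [h1] at hlast
      exact hlast
    have hrest : pvFix m (t.drop (k + 1)) = pvIns m (t.drop (k + 1)) :=
      ihn _ hlenb _ hlastb rfl
    rw [hrest]
    -- head of pvIns (z :: w) is z
    obtain ⟨tl, htl⟩ := pvIns_cons_head m z w
    rw [hzw]
    -- compute the right-hand side
    conv_rhs => rw [hsplit, hzw, pvIns_skip m _ _ hnma]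
    show t.take k ++ [m] ++ (if PySem.Chars.startswith (pvIns m (z :: w)) [' '] then [] else [' ']) ++ pvIns m (z :: w)
        = t.take k ++ pvIns m (m :: z :: w)
    rw [htl]
    rw [pvIns_two, htl]
    by_cases hz : z = ' '
    · subst hz
      have hsw : PySem.Chars.startswith (' ' :: tl) [' '] = true := by
        rw [PySem.Chars.startswith_iff]
        exact ⟨tl, rfl⟩
      simp [hsw]
    · have hsw : PySem.Chars.startswith (z :: tl) [' '] = false := by
        rw [← Bool.not_eq_true, PySem.Chars.startswith_iff]
        intro ⟨u, hu⟩
        simp only [List.cons_append, List.cons.injEq] at hu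
        exact hz hu.1.symm
      simp [hsw, hz]

-- the three single-mark passes compose to the all-marks pass
lemma pv_compose (t : List Char) :
    pvIns '!' (pvIns '?' (pvIns '.' t)) = pvInsAll t := by
  induction t with
  | nil => rfl
  | cons x l ih =>
    cases l with
    | nil => rfl
    | cons y r =>
      obtain ⟨t1, h1⟩ := pvIns_cons_head '.' y r
      have h2' := pvIns_cons_head '?' y t1
      rw [← h1] at h2'
      obtain ⟨t2, h2⟩ := h2'
      by_cases hy : y = ' '
      · subst hy
        have c1 : pvIns '.' (x :: ' ' :: r) = x :: pvIns '.' (' ' :: r) := by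
          rw [pvIns_two]; simp
        have c2 : pvIns '?' (x :: ' ' :: t1) = x :: pvIns '?' (' ' :: t1) := by
          rw [pvIns_two]; simp
        have c3 : pvIns '!' (x :: ' ' :: t2) = x :: pvIns '!' (' ' :: t2) := by
          rw [pvIns_two]; simp
        rw [c1, h1, c2, ← h1, h2, c3, ← h2, ih]
        show _ = pvInsAll (x :: ' ' :: r)
        rw [pvInsAll_two]
        simp
      · by_cases hx1 : x = '.'
        · subst hx1
          have c1 : pvIns '.' ('.' :: y :: r) = '.' :: ' ' :: pvIns '.' (y :: r) := by
            rw [pvIns_two]; simp [hy]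
          have c2 : pvIns '?' ('.' :: ' ' :: (y :: t1)) = '.' :: pvIns '?' (' ' :: y :: t1) := by
            rw [pvIns_two]; simp
          have c2' : pvIns '?' (' ' :: y :: t1) = ' ' :: pvIns '?' (y :: t1) := by
            rw [pvIns_two]; simp
          have c3 : pvIns '!' ('.' :: ' ' :: (y :: t2)) = '.' :: pvIns '!' (' ' :: y :: t2) := by
            rw [pvIns_two]; simp
          have c3' : pvIns '!' (' ' :: y :: t2) = ' ' :: pvIns '!' (y :: t2) := by
            rw [pvIns_two]; simp
          rw [c1, h1, c2, c2', ← h1, h2, c3, c3', ← h2, ih]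
          show _ = pvInsAll ('.' :: y :: r)
          rw [pvInsAll_two]
          simp [hy]
        · by_cases hx2 : x = '?'
          · subst hx2
            have c1 : pvIns '.' ('?' :: y :: r) = '?' :: pvIns '.' (y :: r) := by
              rw [pvIns_two]; simp
            have c2 : pvIns '?' ('?' :: y :: t1) = '?' :: ' ' :: pvIns '?' (y :: t1) := by
              rw [pvIns_two]; simp [hy]
            have c3 : pvIns '!' ('?' :: ' ' :: (y :: t2)) = '?' :: pvIns '!' (' ' :: y :: t2) := by
              rw [pvIns_two]; simp
            have c3' : pvIns '!' (' ' :: y :: t2) = ' ' :: pvIns '!' (y :: t2) := by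
              rw [pvIns_two]; simp
            rw [c1, h1, c2, ← h1, h2, c3, c3', ← h2, ih]
            show _ = pvInsAll ('?' :: y :: r)
            rw [pvInsAll_two]
            simp [hy]
          · by_cases hx3 : x = '!'
            · subst hx3
              have c1 : pvIns '.' ('!' :: y :: r) = '!' :: pvIns '.' (y :: r) := by
                rw [pvIns_two]; simp
              have c2 : pvIns '?' ('!' :: y :: t1) = '!' :: pvIns '?' (y :: t1) := by
                rw [pvIns_two]; simp
              have c3 : pvIns '!' ('!' :: y :: t2) = '!' :: ' ' :: pvIns '!' (y :: t2) := by
                rw [pvIns_two]; simp [hy]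
              rw [c1, h1, c2, ← h1, h2, c3, ← h2, ih]
              show _ = pvInsAll ('!' :: y :: r)
              rw [pvInsAll_two]
              simp [hy]
            · have c1 : pvIns '.' (x :: y :: r) = x :: pvIns '.' (y :: r) := by
                rw [pvIns_two]; simp [hx1]
              have c2 : pvIns '?' (x :: y :: t1) = x :: pvIns '?' (y :: t1) := by
                rw [pvIns_two]; simp [hx2]
              have c3 : pvIns '!' (x :: y :: t2) = x :: pvIns '!' (y :: t2) := by
                rw [pvIns_two]; simp [hx3]
              rw [c1, h1, c2, ← h1, h2, c3, ← h2, ih]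
              show _ = pvInsAll (x :: y :: r)
              rw [pvInsAll_two]
              simp [hx1, hx2, hx3]

-- ===== VERDICT (by name: the statement is the Claim_ definition above) =====
theorem special_point_after_spec : Claim_equal_special_point_after := by
  intro text _
  show special_point_after text = special_point_after_alt text
  unfold special_point_after special_point_after_alt
  simp only
  rw [pv_main text.toList]
  congr 1
  -- expose the nonempty shape of t
  cases ht : text.toList ++ [' '] with
  | nil => exact absurd ht (by simp)
  | cons x l =>
    rw [PySem.List.pyGetD_zero_cons, List.tail_cons, pv_flat]
    -- B's fold is the three passes
    show pvInsAll (x :: l) = pvFix '!' (pvFix '?' (pvFix '.' (x :: l)))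
    have hlast : (x :: l).getLast? = some ' ' := by
      rw [← ht]
      simp
    have hne : ∀ m : Char, m ≠ ' ' → (x :: l).getLast? ≠ some m := by
      intro m hm h
      rw [hlast] at h
      exact hm (Option.some.injEq .. ▸ h).symm
    rw [pvFix_eq_pvIns '.' _ (hne '.' (by decide))]
    have hl1 : (pvIns '.' (x :: l)).getLast? = some ' ' := by
      rw [pvIns_getLast?, hlast]
    rw [pvFix_eq_pvIns '?' _ (by rw [hl1]; decide)]
    have hl2 : (pvIns '?' (pvIns '.' (x :: l))).getLast? = some ' ' := by
      rw [pvIns_getLast?, hl1]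
    rw [pvFix_eq_pvIns '!' _ (by rw [hl2]; decide)]
    exact (pv_compose (x :: l)).symm
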